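-- pv_equiv track=rewrite | github.com/macintoshpie/advent-of-code-2021 | day_04_part_01.py | parse_boards
-- ===== SOURCE A (Python) =====
-- Board = list[list[int]]
--
-- def parse_boards(lines: list[str]) -> list[Board]:
--     current_board = []
--     boards = []
--     for line in lines:
--         if line:
--             current_board.append([int(v) for v in line.split()])
--         else:
--             boards.append(current_board)
--             current_board = []
--     boards.append(current_board)
--
--     return boards
-- ===== SOURCE B (Python) =====
-- Board = list[list[int]]
--
-- def parse_boards(lines: list[str]) -> list[Board]:
--     separators = [i for i, line in enumerate(lines) if not line]
--     boards = []
--     prev = -1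
--     for sep in separators:
--         boards.append([[int(v) for v in line.split()] for line in lines[prev + 1:sep]])
--         prev = sep
--     boards.append([[int(v) for v in line.split()] for line in lines[prev + 1:]])
--     return boards
-- ===== Notes on version B (the rewrite author's own statement) =====
-- stated objective: alternative
-- what changed: Replaces A's single streaming fold that maintains a current-board accumulator with an index-then-slice pass: first collect the positions of blank lines, then build each board by slicing the line list between consecutive separators and parsing each sliced line.
import Mathlib
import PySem

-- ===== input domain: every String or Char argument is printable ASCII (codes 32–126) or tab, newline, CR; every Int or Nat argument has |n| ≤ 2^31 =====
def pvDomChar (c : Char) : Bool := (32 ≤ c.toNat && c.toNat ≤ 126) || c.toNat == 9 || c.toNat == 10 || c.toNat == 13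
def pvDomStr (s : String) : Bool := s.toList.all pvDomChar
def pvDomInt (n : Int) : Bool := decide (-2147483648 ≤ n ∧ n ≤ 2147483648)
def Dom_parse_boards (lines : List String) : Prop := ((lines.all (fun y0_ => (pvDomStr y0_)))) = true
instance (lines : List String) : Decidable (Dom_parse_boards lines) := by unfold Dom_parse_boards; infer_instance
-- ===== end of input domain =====

-- B re-implements the board parser as an index-then-slice pass (collect blank-line
-- positions, then slice between consecutive separators) instead of A's streaming
-- accumulator fold; same cost, different decomposition.

-- ===== PORT A =====
-- [int(v) for v in line.split()]  (shared comprehension of both sources; getD is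
-- never reached under Pre_, which excludes tokens on which int() raises ValueError)
def pvParseLine (line : String) : List Int :=
  (PySem.Str.split₀ line).map (fun v => (PySem.Int.ofStr? v).getD 0)

def parse_boards (lines : List String) : List (List (List Int)) :=
  let st := lines.foldl
    (fun (st : List (List (List Int)) × List (List Int)) line =>
      if line ≠ "" then (st.1, st.2 ++ [pvParseLine line])
      else (st.1 ++ [st.2], []))
    ([], [])
  st.1 ++ [st.2]

-- ===== PORT B =====
-- [i for i, line in enumerate(lines) if not line]
def pvSeps (lines : List String) : List Int :=
  (PySem.List.enumerate lines 0).filterMap (fun p => if p.2 = "" then some p.1 else none)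

-- one iteration of B's for-loop over the separator positions
def pvStepB (lines : List String) (st : List (List (List Int)) × Int) (sep : Int) :
    List (List (List Int)) × Int :=
  (st.1 ++ [(PySem.List.slice lines (some (st.2 + 1)) (some sep)).map pvParseLine], sep)

def parse_boards_alt (lines : List String) : List (List (List Int)) :=
  let st := (pvSeps lines).foldl (pvStepB lines) ([], -1)
  st.1 ++ [(PySem.List.slice lines (some (st.2 + 1)) none).map pvParseLine]

-- ===== PRECONDITION & SPEC =====
-- Pre_ excludes exactly the inputs on which A raises ValueError: a non-empty line
-- containing a whitespace-separated token that int() cannot parse.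
def Pre_parse_boards (lines : List String) : Prop :=
  ∀ line ∈ lines, line ≠ "" →
    ∀ v ∈ PySem.Str.split₀ line, (PySem.Int.ofStr? v).isSome = true
instance (lines : List String) : Decidable (Pre_parse_boards lines) := by
  unfold Pre_parse_boards; infer_instance

def pvWitness_parse_boards : List String := ["1 2", " 7 ", "", "+5 -400"]

def Spec_parse_boards (lines : List String) (out : List (List (List Int))) : Prop :=
  out = parse_boards_alt lines
instance (lines : List String) (out : List (List (List Int))) :
    Decidable (Spec_parse_boards lines out) := by unfold Spec_parse_boards; infer_instance

-- ===== CLAIM (what is proved, stated in full; the proofs are below) =====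
def Claim_equal_parse_boards : Prop :=
  ∀ (lines : List String), Dom_parse_boards lines → Pre_parse_boards lines →
    Spec_parse_boards lines (parse_boards lines)

-- ===== LEMMAS AND PROOFS =====

-- the common mathematical description: split the lines at blank lines
def pvSplit : List String → List String × List (List String)
  | [] => ([], [])
  | l :: rest =>
    let p := pvSplit rest
    if l ≠ "" then (l :: p.1, p.2) else ([], p.1 :: p.2)

def pvSpec (lines : List String) : List (List (List Int)) :=
  ((pvSplit lines).1.map pvParseLine) ::
    (pvSplit lines).2.map (fun g => g.map pvParseLine)

-- ---- A equals the spec ----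

theorem parse_boards_foldl (lines : List String) :
    ∀ (bs : List (List (List Int))) (cur : List (List Int)),
      (let st := lines.foldl
        (fun (st : List (List (List Int)) × List (List Int)) line =>
          if line ≠ "" then (st.1, st.2 ++ [pvParseLine line])
          else (st.1 ++ [st.2], []))
        (bs, cur)
       st.1 ++ [st.2]) =
      bs ++ ((cur ++ (pvSplit lines).1.map pvParseLine) ::
        (pvSplit lines).2.map (fun g => g.map pvParseLine)) := by
  induction lines with
  | nil => intro bs cur; simp [pvSplit]
  | cons l rest ih =>
    intro bs cur
    by_cases hl : l = ""
    · subst hl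
      simpa [pvSplit] using ih (bs ++ [cur]) []
    · simpa [pvSplit, hl] using ih bs (cur ++ [pvParseLine l])

theorem parse_boards_eq_spec (lines : List String) :
    parse_boards lines = pvSpec lines := by
  simpa [parse_boards, pvSpec] using parse_boards_foldl lines [] []

-- ---- B-side helper lemmas ----

theorem pvStepB_factor (L : List String) (ss : List Int) :
    ∀ (acc : List (List (List Int))) (p : Int),
      ss.foldl (pvStepB L) (acc, p) =
        (acc ++ (ss.foldl (pvStepB L) ([], p)).1, (ss.foldl (pvStepB L) ([], p)).2) := by
  induction ss with
  | nil => intro acc p; simp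
  | cons s ss ih =>
    intro acc p
    simp only [List.foldl_cons, pvStepB]
    rw [ih (acc ++ _), ih ([] ++ _)]
    simp

theorem pvStepB_snd_ge (L : List String) (ss : List Int) :
    ∀ (acc : List (List (List Int))) (p : Int), (∀ s ∈ ss, 0 ≤ s) → -1 ≤ p →
      -1 ≤ (ss.foldl (pvStepB L) (acc, p)).2 := by
  induction ss with
  | nil => intro acc p _ hp; simpa using hp
  | cons s ss ih =>
    intro acc p hss hp
    simp only [List.foldl_cons, pvStepB]
    exact ih _ s (fun t ht => hss t (List.mem_cons_of_mem _ ht))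
      (le_trans (by norm_num) (hss s (List.mem_cons_self)))

theorem pvSliceShift {α : Type} (x : α) (xs : List α) (a b : Int)
    (ha : 0 ≤ a) (hb : 0 ≤ b) :
    PySem.List.slice (x :: xs) (some (a + 1)) (some (b + 1)) =
      PySem.List.slice xs (some a) (some b) := by
  rw [PySem.List.slice_toNat _ (by omega) (by omega),
      PySem.List.slice_toNat _ ha hb]
  have h1 : (a + 1).toNat = a.toNat + 1 := by omega
  have h2 : (b + 1).toNat = b.toNat + 1 := by omega
  simp [h1, h2]

theorem pvSliceShift0 {α : Type} (x : α) (xs : List α) (b : Int) (hb : 0 ≤ b) :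
    PySem.List.slice (x :: xs) (some 0) (some (b + 1)) =
      x :: PySem.List.slice xs (some 0) (some b) := by
  simp only [PySem.List.slice_zero_start]
  rw [PySem.List.slice_to _ (by omega), PySem.List.slice_to _ hb]
  have h2 : (b + 1).toNat = b.toNat + 1 := by omega
  simp [h2]

theorem pvSliceShiftFrom {α : Type} (x : α) (xs : List α) (a : Int) (ha : 0 ≤ a) :
    PySem.List.slice (x :: xs) (some (a + 1)) none = PySem.List.slice xs (some a) none := by
  rw [PySem.List.slice_from _ (by omega), PySem.List.slice_from _ ha]
  have h1 : (a + 1).toNat = a.toNat + 1 := by omega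
  simp [h1]

theorem pvStepB_shift (x : String) (xs : List String) (ss : List Int) :
    ∀ (p : Int), (∀ s ∈ ss, 0 ≤ s) → -1 ≤ p →
      (ss.map (· + 1)).foldl (pvStepB (x :: xs)) ([], p + 1) =
        ((ss.foldl (pvStepB xs) ([], p)).1, (ss.foldl (pvStepB xs) ([], p)).2 + 1) := by
  induction ss with
  | nil => intro p _ _; simp
  | cons s ss ih =>
    intro p hss hp
    have hs : 0 ≤ s := hss s List.mem_cons_self
    simp only [List.map_cons, List.foldl_cons, pvStepB]
    have hsl : PySem.List.slice (x :: xs) (some (p + 1 + 1)) (some (s + 1)) =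
        PySem.List.slice xs (some (p + 1)) (some s) := by
      have := pvSliceShift x xs (p + 1) s (by omega) hs
      simpa using this
    rw [hsl]
    rw [pvStepB_factor (x :: xs), pvStepB_factor xs,
        ih s (fun t ht => hss t (List.mem_cons_of_mem _ ht)) (by omega)]

theorem pvSeps_gen (xs : List String) :
    ∀ (s : Int),
      (PySem.List.enumerate xs (s + 1)).filterMap
          (fun p => if p.2 = "" then some p.1 else none) =
        ((PySem.List.enumerate xs s).filterMap
          (fun p => if p.2 = "" then some p.1 else none)).map (· + 1) := by
  induction xs with
  | nil => intro s; simp [PySem.List.enumerate_nil]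
  | cons x xs ih =>
    intro s
    rw [PySem.List.enumerate_cons, PySem.List.enumerate_cons]
    by_cases hx : x = ""
    · simp only [List.filterMap_cons, hx]
      rw [show s + 1 + 1 = (s + 1) + 1 by ring, ih (s + 1)]
      simp
    · simp only [List.filterMap_cons, if_neg hx]
      rw [show s + 1 + 1 = (s + 1) + 1 by ring, ih (s + 1)]

theorem pvSeps_cons (l : String) (rest : List String) :
    pvSeps (l :: rest) =
      (if l = "" then [(0 : Int)] else []) ++ (pvSeps rest).map (· + 1) := by
  unfold pvSeps
  rw [PySem.List.enumerate_cons]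
  have h := pvSeps_gen rest 0
  norm_num at h
  by_cases hl : l = "" <;> simp [hl, h]

theorem pvSeps_cons_blank (rest : List String) :
    pvSeps ("" :: rest) = (0 : Int) :: (pvSeps rest).map (· + 1) := by
  rw [pvSeps_cons]; simp

theorem pvSeps_cons_nonblank (l : String) (rest : List String) (hl : l ≠ "") :
    pvSeps (l :: rest) = (pvSeps rest).map (· + 1) := by
  rw [pvSeps_cons]; simp [hl]

theorem pvSeps_nonneg (lines : List String) : ∀ s ∈ pvSeps lines, 0 ≤ s := by
  intro s hs
  unfold pvSeps at hs
  obtain ⟨p, hp, hpe⟩ := List.mem_filterMap.mp hs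
  obtain ⟨k, hk, rfl⟩ := (PySem.List.mem_enumerate_iff lines 0 p).mp hp
  by_cases h : lines[k] = "" <;> simp [h] at hpe
  omega

-- B on a blank first line: prepend an empty board
theorem parse_boards_alt_blank (rest : List String) :
    parse_boards_alt ("" :: rest) = [] :: parse_boards_alt rest := by
  have hnn := pvSeps_nonneg rest
  unfold parse_boards_alt
  have hstep : pvStepB ("" :: rest) ([], -1) 0 = ([[]], 0) := by
    simp [pvStepB, PySem.List.slice_to ("" :: rest) (le_refl (0 : Int))]
  rw [pvSeps_cons_blank, List.foldl_cons, hstep, pvStepB_factor ("" :: rest)]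
  have hshift := pvStepB_shift "" rest (pvSeps rest) (-1) hnn (by norm_num)
  norm_num at hshift
  rw [hshift]
  have hge : -1 ≤ ((pvSeps rest).foldl (pvStepB rest) ([], -1)).2 :=
    pvStepB_snd_ge rest (pvSeps rest) [] (-1) hnn (by norm_num)
  have hfin := pvSliceShiftFrom "" rest
      (((pvSeps rest).foldl (pvStepB rest) ([], -1)).2 + 1) (by omega)
  have hfin' : PySem.List.slice ("" :: rest)
      (some (((pvSeps rest).foldl (pvStepB rest) ([], -1)).2 + 2)) none =
      PySem.List.slice rest
        (some (((pvSeps rest).foldl (pvStepB rest) ([], -1)).2 + 1)) none := by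
    rw [show ((pvSeps rest).foldl (pvStepB rest) ([], -1)).2 + 2 =
          (((pvSeps rest).foldl (pvStepB rest) ([], -1)).2 + 1) + 1 by ring]
    exact hfin
  simp [hfin]

-- B on a non-blank first line: cons the parsed line onto the first board
theorem parse_boards_alt_nonblank (l : String) (rest : List String) (hl : l ≠ "") :
    ∀ (b : List (List Int)) (bs : List (List (List Int))),
      parse_boards_alt rest = b :: bs →
      parse_boards_alt (l :: rest) = (pvParseLine l :: b) :: bs := by
  have hnn := pvSeps_nonneg rest
  intro b bs hrest
  unfold parse_boards_alt at hrest ⊢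
  rw [pvSeps_cons_nonblank l rest hl]
  cases hss : pvSeps rest with
  | nil =>
    rw [hss] at hrest
    simp only [List.foldl_nil, List.map_nil, List.nil_append] at hrest ⊢
    rw [show (-1 : Int) + 1 = 0 by ring] at hrest ⊢
    rw [PySem.List.slice_from _ (le_refl (0 : Int))] at hrest ⊢
    simp only [Int.toNat_zero, List.drop_zero] at hrest ⊢
    injection hrest with h1 h2
    rw [← h1, ← h2]
    simp
  | cons s ss =>
    have hs : 0 ≤ s := hnn s (by rw [hss]; exact List.mem_cons_self)
    have hss' : ∀ t ∈ ss, 0 ≤ t := fun t ht =>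
      hnn t (by rw [hss]; exact List.mem_cons_of_mem _ ht)
    rw [hss] at hrest
    simp only [List.map_cons, List.foldl_cons] at hrest ⊢
    have hstep_out : pvStepB (l :: rest) ([], -1) (s + 1) =
        ([pvParseLine l :: (PySem.List.slice rest (some 0) (some s)).map pvParseLine],
          s + 1) := by
      simp only [pvStepB]
      rw [show (-1 : Int) + 1 = 0 by ring, pvSliceShift0 l rest s hs]
      simp
    have hstep_in : pvStepB rest ([], -1) s =
        ([(PySem.List.slice rest (some 0) (some s)).map pvParseLine], s) := by
      simp only [pvStepB]
      rw [show (-1 : Int) + 1 = 0 by ring]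
      simp
    rw [hstep_out, pvStepB_factor (l :: rest),
        pvStepB_shift l rest ss s hss' (by omega)]
    rw [hstep_in, pvStepB_factor rest] at hrest
    have hge : -1 ≤ (ss.foldl (pvStepB rest) ([], s)).2 :=
      pvStepB_snd_ge rest ss [] s hss' (by omega)
    have hfin : PySem.List.slice (l :: rest)
        (some ((ss.foldl (pvStepB rest) ([], s)).2 + 1 + 1)) none =
        PySem.List.slice rest (some ((ss.foldl (pvStepB rest) ([], s)).2 + 1)) none :=
      pvSliceShiftFrom l rest ((ss.foldl (pvStepB rest) ([], s)).2 + 1) (by omega)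
    have hfin' : PySem.List.slice (l :: rest)
        (some ((ss.foldl (pvStepB rest) ([], s)).2 + 2)) none =
        PySem.List.slice rest (some ((ss.foldl (pvStepB rest) ([], s)).2 + 1)) none := by
      rw [show (ss.foldl (pvStepB rest) ([], s)).2 + 2 =
            ((ss.foldl (pvStepB rest) ([], s)).2 + 1) + 1 by ring]
      exact hfin
    simp only [List.cons_append, List.nil_append] at hrest ⊢
    simp [hfin] at hrest ⊢
    obtain ⟨h1, h2⟩ := hrest
    exact ⟨h1 ▸ rfl, h2 ▸ rfl⟩

theorem parse_boards_alt_eq_spec (lines : List String) :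
    parse_boards_alt lines = pvSpec lines := by
  induction lines with
  | nil =>
    simp [parse_boards_alt, pvSeps, pvSpec, pvSplit, PySem.List.enumerate_nil]
  | cons l rest ih =>
    by_cases hl : l = ""
    · subst hl
      rw [parse_boards_alt_blank, ih]
      simp [pvSpec, pvSplit]
    · rw [parse_boards_alt_nonblank l rest hl _ _ ih]
      simp [pvSpec, pvSplit, hl]

-- ===== VERDICT (by name: the statement is the Claim_ definition above) =====
theorem parse_boards_spec : Claim_equal_parse_boards := by
  intro lines _ _
  unfold Spec_parse_boards
  rw [parse_boards_eq_spec, parse_boards_alt_eq_spec]
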